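-- pv_equiv track=rewrite | github.com/jimcasey/home | projects/advent-of-code/2021/19/part2.py | findMatchingNeighbors
-- ===== SOURCE A (Python) =====
-- def findMatchingNeighbors(fieldMap, scannerMaps):
--   for fieldHash in fieldMap.keys():
--     for scanner, scannerMap in scannerMaps:
--       for scannerHash in scannerMap.keys():
--         if scannerHash == fieldHash:
--           fieldNeighbors = fieldMap[scannerHash]
--           scannerNeighbors = scannerMap[scannerHash]
--           return (scanner, fieldNeighbors, scannerNeighbors)
-- ===== SOURCE B (Python) =====
-- def findMatchingNeighbors(fieldMap, scannerMaps):
--   # Build, in one pass, an index from each scanner hash to the FIRST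
--   # (scanner, scannerMap) containing it (scanner order preserved).
--   index = {}
--   for scanner, scannerMap in scannerMaps:
--     for scannerHash in scannerMap:
--       if scannerHash not in index:
--         index[scannerHash] = (scanner, scannerMap)
--   # First fieldHash (in fieldMap order) present in any scanner map wins.
--   for fieldHash in fieldMap:
--     if fieldHash in index:
--       scanner, scannerMap = index[fieldHash]
--       return (scanner, fieldMap[fieldHash], scannerMap[fieldHash])
--   return None
-- ===== Notes on version B (the rewrite author's own statement) =====
-- stated objective: faster
-- what changed: Replaces the triple nested scan (for every field hash, rescan every scanner map's keys) by a single pass that builds a hash index from scanner hash to its first (scanner, scannerMap), then one lookup per field hash.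
import Mathlib
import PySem

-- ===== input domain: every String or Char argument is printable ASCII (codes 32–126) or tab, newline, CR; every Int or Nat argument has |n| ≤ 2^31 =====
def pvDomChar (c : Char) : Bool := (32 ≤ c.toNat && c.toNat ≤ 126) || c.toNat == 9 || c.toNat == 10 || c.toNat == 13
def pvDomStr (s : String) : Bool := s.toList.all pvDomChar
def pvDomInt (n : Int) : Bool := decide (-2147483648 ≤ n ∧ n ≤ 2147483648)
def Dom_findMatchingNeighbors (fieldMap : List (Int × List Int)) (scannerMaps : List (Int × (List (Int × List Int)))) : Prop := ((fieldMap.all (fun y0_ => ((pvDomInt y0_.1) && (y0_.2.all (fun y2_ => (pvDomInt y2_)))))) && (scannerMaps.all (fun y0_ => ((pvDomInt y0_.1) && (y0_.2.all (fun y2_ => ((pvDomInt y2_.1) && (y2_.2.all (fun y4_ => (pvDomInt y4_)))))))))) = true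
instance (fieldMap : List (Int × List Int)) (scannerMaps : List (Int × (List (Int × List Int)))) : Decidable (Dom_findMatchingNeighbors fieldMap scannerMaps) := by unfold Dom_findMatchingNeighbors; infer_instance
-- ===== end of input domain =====

-- B replaces A's triple nested scan by a one-pass index (hash → first scanner) plus one lookup per field hash; same return value everywhere.


-- ===== PORT A =====
-- dict lookup d[k] on an association list: first matching key.  The default []
-- is unreachable in both ports: lookups are only performed on keys taken from
-- the dict's own key list, so Python never raises KeyError here.
def pyItem (m : List (Int × List Int)) (k : Int) : List Int :=
  ((m.find? (fun p => p.1 == k)).map (·.2)).getD []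

-- innermost loop: for scannerHash in scannerMap.keys(): if scannerHash == fieldHash: return …
def fmnA3 (fieldMap scannerMap : List (Int × List Int)) (scanner fieldHash : Int) :
    List Int → Option (Int × List Int × List Int)
  | [] => none
  | scannerHash :: hs =>
    if scannerHash == fieldHash then
      some (scanner, pyItem fieldMap scannerHash, pyItem scannerMap scannerHash)
    else fmnA3 fieldMap scannerMap scanner fieldHash hs

-- middle loop: for scanner, scannerMap in scannerMaps
def fmnA2 (fieldMap : List (Int × List Int)) (fieldHash : Int) :
    List (Int × (List (Int × List Int))) → Option (Int × List Int × List Int)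
  | [] => none
  | (scanner, scannerMap) :: rest =>
    match fmnA3 fieldMap scannerMap scanner fieldHash (scannerMap.map (·.1)) with
    | some r => some r
    | none => fmnA2 fieldMap fieldHash rest

-- outer loop: for fieldHash in fieldMap.keys()
def fmnA1 (fieldMap : List (Int × List Int)) (scannerMaps : List (Int × (List (Int × List Int)))) :
    List Int → Option (Int × List Int × List Int)
  | [] => none
  | fieldHash :: hs =>
    match fmnA2 fieldMap fieldHash scannerMaps with
    | some r => some r
    | none => fmnA1 fieldMap scannerMaps hs

def findMatchingNeighbors (fieldMap : List (Int × List Int)) (scannerMaps : List (Int × (List (Int × List Int)))) : Option (Int × List Int × List Int) :=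
  fmnA1 fieldMap scannerMaps (fieldMap.map (·.1))

-- ===== PORT B =====
-- one pass over scannerMaps: index[h] = first (scanner, scannerMap) whose keys contain h
def buildIndex (scannerMaps : List (Int × (List (Int × List Int)))) :
    List (Int × (Int × List (Int × List Int))) :=
  scannerMaps.foldl
    (fun idx sm =>
      sm.2.foldl
        (fun idx p =>
          if idx.any (fun e => e.1 == p.1) then idx else idx ++ [(p.1, (sm.1, sm.2))])
        idx)
    []

-- final loop: for fieldHash in fieldMap: if fieldHash in index: return …
def fmnB1 (fieldMap : List (Int × List Int)) (index : List (Int × (Int × List (Int × List Int)))) :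
    List Int → Option (Int × List Int × List Int)
  | [] => none
  | fieldHash :: hs =>
    match index.find? (fun e => e.1 == fieldHash) with
    | some e => some (e.2.1, pyItem fieldMap fieldHash, pyItem e.2.2 fieldHash)
    | none => fmnB1 fieldMap index hs

def findMatchingNeighbors_alt (fieldMap : List (Int × List Int)) (scannerMaps : List (Int × (List (Int × List Int)))) : Option (Int × List Int × List Int) :=
  fmnB1 fieldMap (buildIndex scannerMaps) (fieldMap.map (·.1))

-- ===== PRECONDITION & SPEC =====
def Spec_findMatchingNeighbors (fieldMap : List (Int × List Int)) (scannerMaps : List (Int × (List (Int × List Int)))) (out : Option (Int × List Int × List Int)) : Prop := out = findMatchingNeighbors_alt fieldMap scannerMaps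
instance (fieldMap : List (Int × List Int)) (scannerMaps : List (Int × (List (Int × List Int)))) (out : Option (Int × List Int × List Int)) : Decidable (Spec_findMatchingNeighbors fieldMap scannerMaps out) := by unfold Spec_findMatchingNeighbors; infer_instance

-- ===== CLAIM (what is proved, stated in full; the proofs are below) =====
def Claim_equal_findMatchingNeighbors : Prop := ∀ (fieldMap : List (Int × List Int)) (scannerMaps : List (Int × (List (Int × List Int)))), Dom_findMatchingNeighbors fieldMap scannerMaps → Spec_findMatchingNeighbors fieldMap scannerMaps (findMatchingNeighbors fieldMap scannerMaps)

-- ===== LEMMAS AND PROOFS =====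

-- first scanner (in order) whose key list contains h — the common reference point
def firstScanner (h : Int) : List (Int × (List (Int × List Int))) → Option (Int × (List (Int × List Int)))
  | [] => none
  | sm :: rest => if (sm.2.map (·.1)).any (· == h) then some sm else firstScanner h rest

-- A's innermost loop characterised
theorem fmnA3_eq (fieldMap scannerMap : List (Int × List Int)) (scanner fieldHash : Int)
    (keys : List Int) :
    fmnA3 fieldMap scannerMap scanner fieldHash keys =
      if keys.any (· == fieldHash) then
        some (scanner, pyItem fieldMap fieldHash, pyItem scannerMap fieldHash)
      else none := by
  induction keys with
  | nil => simp [fmnA3]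
  | cons k ks ih =>
    by_cases hk : k = fieldHash
    · subst hk; simp [fmnA3]
    · simp [fmnA3, hk, ih]

-- A's middle loop characterised by firstScanner
theorem fmnA2_eq (fieldMap : List (Int × List Int)) (fieldHash : Int)
    (sms : List (Int × (List (Int × List Int)))) :
    fmnA2 fieldMap fieldHash sms =
      match firstScanner fieldHash sms with
      | some sm => some (sm.1, pyItem fieldMap fieldHash, pyItem sm.2 fieldHash)
      | none => none := by
  induction sms with
  | nil => simp [fmnA2, firstScanner]
  | cons sm rest ih =>
    obtain ⟨s, m⟩ := sm
    by_cases hm : (m.map (·.1)).any (· == fieldHash) = true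
    · simp [fmnA2, fmnA3_eq, firstScanner, hm]
    · simp [fmnA2, fmnA3_eq, firstScanner, hm, ih]

-- find? on the evolving index, abbreviated
def gIdx (h : Int) (idx : List (Int × (Int × List (Int × List Int)))) :
    Option (Int × (Int × List (Int × List Int))) :=
  idx.find? (fun e => e.1 == h)

theorem gIdx_append (h : Int) (idx : List (Int × (Int × List (Int × List Int)))) (x) :
    gIdx h (idx ++ [x]) = (gIdx h idx).or (if x.1 == h then some x else none) := by
  unfold gIdx
  rw [List.find?_append]
  cases hfi : idx.find? (fun e => e.1 == h) with
  | none => simp [List.find?]; split <;> simp_all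
  | some v => simp

theorem gIdx_isSome_iff_any (h : Int) (idx : List (Int × (Int × List (Int × List Int)))) :
    (gIdx h idx).isSome = idx.any (fun e => e.1 == h) := by
  induction idx with
  | nil => simp [gIdx]
  | cons e es ih =>
    by_cases he : e.1 = h
    · simp [gIdx, List.find?, he]
    · have he' : (e.1 == h) = false := by simpa using he
      simp only [gIdx, List.find?, List.any_cons, he'] at ih ⊢
      simpa using ih

theorem gIdx_step_ne (h : Int) (p : Int × List Int) (v : Int × List (Int × List Int))
    (idx : List (Int × (Int × List (Int × List Int)))) (he : p.1 ≠ h) :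
    gIdx h (if idx.any (fun e => e.1 == p.1) then idx else idx ++ [(p.1, v)]) = gIdx h idx := by
  split
  · rfl
  · rw [gIdx_append]; simp [he]

-- the inner fold of buildIndex, seen through gIdx
theorem gIdx_inner (h s : Int) (m : List (Int × List Int))
    (l : List (Int × List Int)) (idx : List (Int × (Int × List (Int × List Int)))) :
    gIdx h (l.foldl (fun idx p =>
        if idx.any (fun e => e.1 == p.1) then idx else idx ++ [(p.1, (s, m))]) idx) =
      (gIdx h idx).or (if (l.map (·.1)).any (· == h) then some (h, (s, m)) else none) := by
  induction l generalizing idx with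
  | nil => simp
  | cons p ps ih =>
    simp only [List.foldl_cons, List.map_cons, List.any_cons]
    rcases eq_or_ne p.1 h with he | he
    · cases hfi : gIdx h idx with
      | some v =>
        have hany : idx.any (fun e => e.1 == p.1) = true := by
          rw [he, ← gIdx_isSome_iff_any, hfi]; rfl
        rw [hany]
        simp only [if_pos]
        rw [ih, hfi]
        simp [he]
      | none =>
        have hany : idx.any (fun e => e.1 == p.1) = false := by
          rw [he, ← gIdx_isSome_iff_any, hfi]; rfl
        rw [hany]
        simp only [Bool.false_eq_true, if_false]
        rw [ih, gIdx_append, hfi]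
        simp [he, Option.or]
    · have he' : (p.1 == h) = false := by simpa using he
      rw [ih, gIdx_step_ne h p (s, m) idx he]
      simp only [he', Bool.false_or]

-- buildIndex's lookup is exactly firstScanner
theorem gIdx_buildIndex (h : Int) (sms : List (Int × (List (Int × List Int)))) :
    gIdx h (buildIndex sms) =
      (firstScanner h sms).map (fun sm => (h, sm)) := by
  unfold buildIndex
  suffices H : ∀ idx, gIdx h (sms.foldl (fun idx sm => sm.2.foldl
      (fun idx p => if idx.any (fun e => e.1 == p.1) then idx else idx ++ [(p.1, (sm.1, sm.2))]) idx) idx) =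
      (gIdx h idx).or ((firstScanner h sms).map (fun sm => (h, sm))) by
    rw [H []]; simp [gIdx]
  induction sms with
  | nil => intro idx; simp [firstScanner]
  | cons sm rest ih =>
    intro idx
    simp only [List.foldl_cons, ih, gIdx_inner, firstScanner]
    by_cases hm : (sm.2.map (·.1)).any (· == h) = true
    · simp [hm]
    · simp [hm]

-- the two main loops agree on any key list
theorem loops_eq (fieldMap : List (Int × List Int))
    (sms : List (Int × (List (Int × List Int)))) (keys : List Int) :
    fmnA1 fieldMap sms keys = fmnB1 fieldMap (buildIndex sms) keys := by
  induction keys with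
  | nil => simp [fmnA1, fmnB1]
  | cons fh hs ih =>
    have hb := gIdx_buildIndex fh sms
    simp only [fmnA1, fmnB1, fmnA2_eq]
    rw [show (buildIndex sms).find? (fun e => e.1 == fh) = gIdx fh (buildIndex sms) from rfl, hb]
    cases firstScanner fh sms with
    | none => simpa using ih
    | some sm => simp

-- ===== VERDICT (by name: the statement is the Claim_ definition above) =====
theorem findMatchingNeighbors_spec : Claim_equal_findMatchingNeighbors := by
  intro fieldMap scannerMaps _
  unfold Spec_findMatchingNeighbors findMatchingNeighbors findMatchingNeighbors_alt
  exact loops_eq fieldMap scannerMaps (fieldMap.map (·.1))
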